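-- pv_equiv track=rewrite | github.com/Nissanth25/Pre-Placement-Training | 13.01.2026/Split With Minimum Sum.py | splitNum
-- ===== SOURCE A (Python) =====
-- def splitNum(num):
--     arr = []
--
--     while num > 0:
--         rem = num % 10
--         arr.append(rem)
--         num = num //10
--     arr.sort()
--     num1 = ''
--     num2 = ''
--     i=0
--     while i < len(arr):
--         num1+=str(arr[i])
--         i+=1
--         if i < len(arr):
--             num2+=str(arr[i])
--             i+=1
--     return int(num1) + int(num2)
-- ===== SOURCE B (Python) =====
-- def splitNum(num):
--     counts = [0] * 10
--     while num > 0: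
--         counts[num % 10] += 1
--         num //= 10
--     n1 = 0
--     n2 = 0
--     first = True
--     for d in range(10):
--         for _ in range(counts[d]):
--             if first:
--                 n1 = n1 * 10 + d
--             else:
--                 n2 = n2 * 10 + d
--             first = not first
--     return n1 + n2
-- ===== Notes on version B (the rewrite author's own statement) =====
-- stated objective: alternative
-- what changed: Replaces list-building + comparison sort + alternating string concatenation + int() parsing by a 10-bucket counting sort over the extracted digits and direct alternating integer accumulation (n*10+d), so no intermediate list, sort, or string/parse step exists.
import Mathlib
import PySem

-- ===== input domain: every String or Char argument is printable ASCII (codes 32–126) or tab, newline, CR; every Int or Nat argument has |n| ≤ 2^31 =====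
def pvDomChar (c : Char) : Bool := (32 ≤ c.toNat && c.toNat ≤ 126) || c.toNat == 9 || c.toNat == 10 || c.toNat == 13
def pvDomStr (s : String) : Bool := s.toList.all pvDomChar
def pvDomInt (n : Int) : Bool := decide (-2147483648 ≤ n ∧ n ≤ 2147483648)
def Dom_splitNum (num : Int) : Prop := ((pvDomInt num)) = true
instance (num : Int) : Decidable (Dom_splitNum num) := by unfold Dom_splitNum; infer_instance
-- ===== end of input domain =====

-- B replaces A's comparison sort + alternating string building + int() parsing by a
-- 10-bucket counting sort and direct alternating integer accumulation (objective: alternative).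

-- ===== PORT A =====
-- 'while num > 0: rem = num % 10; arr.append(rem); num = num // 10'
def pvExtract (num : Int) (arr : List Int) : List Int :=
  if 0 < num then
    pvExtract (PySem.Int.floordiv num 10) (arr ++ [PySem.Int.mod num 10])
  else arr
termination_by num.toNat
decreasing_by
  rename_i h
  rw [PySem.Int.floordiv_eq_ediv_of_pos (by omega)]
  have h2 : num / 10 < num := Int.ediv_lt_of_lt_mul (by omega) (by omega)
  have h3 : 0 ≤ num / 10 := Int.ediv_nonneg (le_of_lt h) (by omega)
  omega

-- int(s), ported BY HAND: exact for the strings this program builds (concatenations of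
-- str(d) for single digits d, possibly empty: a nonempty digit string parses to its
-- decimal value, the empty string is a ValueError = none).
def pvInt? (cs : List Char) : Option Int :=
  if cs = [] then none
  else some (cs.foldl (fun n c => n * 10 + ((c.toNat : Int) - 48)) 0)

-- 'while i < len(arr): num1 += str(arr[i]); i += 1; if i < len(arr): num2 += str(arr[i]); i += 1'
def pvPairs : List Int → List Char × List Char
  | [] => ([], [])
  | [a] => (PySem.Int.toChars a, [])
  | a :: b :: rest =>
      let p := pvPairs rest
      (PySem.Int.toChars a ++ p.1, PySem.Int.toChars b ++ p.2)

def splitNum (num : Int) : Int :=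
  let arr := PySem.List.sorted (pvExtract num []) (fun x => x) false
  let p := pvPairs arr
  (pvInt? p.1).getD 0 + (pvInt? p.2).getD 0  -- none = ValueError; excluded by Pre_splitNum

-- ===== PORT B =====
-- 'while num > 0: counts[num % 10] += 1; num //= 10'   (index num % 10 is always in range 0..9)
def pvCount (num : Int) (counts : List Int) : List Int :=
  if 0 < num then
    pvCount (PySem.Int.floordiv num 10)
      (PySem.List.pySetD counts (PySem.Int.mod num 10)
        (PySem.List.pyGetD counts (PySem.Int.mod num 10) 0 + 1))
  else counts
termination_by num.toNat
decreasing_by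
  rename_i h
  rw [PySem.Int.floordiv_eq_ediv_of_pos (by omega)]
  have h2 : num / 10 < num := Int.ediv_lt_of_lt_mul (by omega) (by omega)
  have h3 : 0 ≤ num / 10 := Int.ediv_nonneg (le_of_lt h) (by omega)
  omega

-- one step of the alternating assignment: state (n1, n2, first)
def pvEmit (d : Int) (st : Int × Int × Bool) : Int × Int × Bool :=
  if st.2.2 then (st.1 * 10 + d, st.2.1, false) else (st.1, st.2.1 * 10 + d, true)

def splitNum_alt (num : Int) : Int :=
  let counts := pvCount num (List.replicate 10 0)
  let st := (PySem.List.pyRange 0 10 1).foldl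
    (fun st d =>
      (List.range (PySem.List.pyGetD counts d 0).toNat).foldl (fun st _ => pvEmit d st) st)
    (0, 0, true)
  st.1 + st.2.1

-- ===== PRECONDITION & SPEC =====
-- A raises ValueError (int('') on num1 or num2) for every num < 10, so Pre_ is exactly num ≥ 10.
def Pre_splitNum (num : Int) : Prop := 10 ≤ num
instance (num : Int) : Decidable (Pre_splitNum num) := by unfold Pre_splitNum; infer_instance
def pvWitness_splitNum : Int := 4325

def Spec_splitNum (num : Int) (out : Int) : Prop := out = splitNum_alt num
instance (num : Int) (out : Int) : Decidable (Spec_splitNum num out) := by unfold Spec_splitNum; infer_instance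

-- ===== CLAIM (what is proved, stated in full; the proofs are below) =====
def Claim_equal_splitNum : Prop := ∀ (num : Int), Dom_splitNum num → Pre_splitNum num → Spec_splitNum num (splitNum num)

-- ===== LEMMAS AND PROOFS =====

-- the digit list of num, least-significant first (the common recursion of both loops)
def pvDigs (num : Int) : List Int :=
  if 0 < num then PySem.Int.mod num 10 :: pvDigs (PySem.Int.floordiv num 10) else []
termination_by num.toNat
decreasing_by
  rename_i h
  rw [PySem.Int.floordiv_eq_ediv_of_pos (by omega)]
  have h2 : num / 10 < num := Int.ediv_lt_of_lt_mul (by omega) (by omega)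
  have h3 : 0 ≤ num / 10 := Int.ediv_nonneg (le_of_lt h) (by omega)
  omega

-- even- and odd-indexed elements of a list
def pvSplit2 : List Int → List Int × List Int
  | [] => ([], [])
  | a :: t => let p := pvSplit2 t; (a :: p.2, p.1)

-- decimal value accumulation
def pvVal (n : Int) (l : List Int) : Int := l.foldl (fun x d => x * 10 + d) n

def pvChars (l : List Int) : List Char := l.flatMap (fun d => PySem.Int.toChars d)

theorem pvExtract_eq (num : Int) : ∀ arr, pvExtract num arr = arr ++ pvDigs num := by
  induction num using pvDigs.induct with
  | case1 num h ih =>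
      intro arr
      rw [pvExtract, pvDigs]
      simp only [if_pos h]
      rw [ih]
      simp
  | case2 num h =>
      intro arr
      rw [pvExtract, pvDigs]
      simp [h]

theorem pvCount_eq (num : Int) : ∀ counts, pvCount num counts =
    (pvDigs num).foldl
      (fun c d => PySem.List.pySetD c d (PySem.List.pyGetD c d 0 + 1)) counts := by
  induction num using pvDigs.induct with
  | case1 num h ih => intro counts; rw [pvCount, pvDigs]; simp only [if_pos h]; rw [ih]; simp
  | case2 num h => intro counts; rw [pvCount, pvDigs]; simp [h]

theorem pvDigs_bounds (num : Int) : ∀ d ∈ pvDigs num, 0 ≤ d ∧ d < 10 := by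
  induction num using pvDigs.induct with
  | case1 num h ih =>
      rw [pvDigs]; simp only [if_pos h, List.mem_cons]
      rintro d (rfl | hd)
      · exact ⟨PySem.Int.mod_nonneg _ (by omega), PySem.Int.mod_lt _ (by omega)⟩
      · exact ih d hd
  | case2 num h => rw [pvDigs]; simp [h]

theorem pvDigs_len2 (num : Int) (h : 10 ≤ num) : 2 ≤ (pvDigs num).length := by
  have h1 : 0 < PySem.Int.floordiv num 10 := by
    rw [PySem.Int.floordiv_eq_ediv_of_pos (by omega)]
    have : (1 : Int) ≤ num / 10 := by
      rw [Int.le_ediv_iff_mul_le (by omega)]; omega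
    omega
  rw [pvDigs]; simp only [if_pos (by omega : (0:Int) < num)]
  rw [pvDigs]; simp only [if_pos h1]
  simp
theorem pvSplit2_len (l : List Int) :
    (pvSplit2 l).1.length = (l.length + 1) / 2 ∧ (pvSplit2 l).2.length = l.length / 2 := by
  induction l with
  | nil => simp [pvSplit2]
  | cons a t ih => simp only [pvSplit2, List.length_cons]; omega

theorem pvSplit2_mem (l : List Int) :
    (∀ x ∈ (pvSplit2 l).1, x ∈ l) ∧ (∀ x ∈ (pvSplit2 l).2, x ∈ l) := by
  induction l with
  | nil => simp [pvSplit2]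
  | cons a t ih =>
      simp only [pvSplit2, List.mem_cons]
      constructor
      · rintro x (rfl | hx)
        · exact Or.inl rfl
        · exact Or.inr (ih.2 x hx)
      · intro x hx; exact Or.inr (ih.1 x hx)

theorem pvPairs_eq (l : List Int) :
    pvPairs l = (pvChars (pvSplit2 l).1, pvChars (pvSplit2 l).2) := by
  induction l using pvPairs.induct with
  | case1 => simp [pvPairs, pvSplit2, pvChars]
  | case2 a => simp [pvPairs, pvSplit2, pvChars]
  | case3 a b rest ih => simp only [pvPairs, pvSplit2, pvChars, List.flatMap_cons, ih]

theorem pvToChars_lit (d : Int) (h0 : 0 ≤ d) (h1 : d < 10) :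
    PySem.Int.toChars d = [Char.ofNat (48 + d.toNat)] := by
  interval_cases d <;> decide

theorem pvToChars_digit (d : Int) (h0 : 0 ≤ d) (h1 : d < 10) :
    ∀ n : Int, (PySem.Int.toChars d).foldl (fun x c => x * 10 + ((c.toNat : Int) - 48)) n
      = n * 10 + d := by
  intro n
  rw [pvToChars_lit d h0 h1]
  simp only [List.foldl_cons, List.foldl_nil]
  have hc : (Char.ofNat (48 + d.toNat)).toNat = 48 + d.toNat := by
    interval_cases d <;> decide
  rw [hc]
  push_cast
  omega

theorem pvChars_ne_nil (l : List Int) (hb : ∀ d ∈ l, 0 ≤ d ∧ d < 10) (h : l ≠ []) :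
    pvChars l ≠ [] := by
  cases l with
  | nil => exact absurd rfl h
  | cons a t =>
      have := hb a (by simp)
      simp [pvChars, pvToChars_lit a this.1 this.2]

theorem pvFoldChars (l : List Int) (hb : ∀ d ∈ l, 0 ≤ d ∧ d < 10) :
    ∀ n : Int, (pvChars l).foldl (fun x c => x * 10 + ((c.toNat : Int) - 48)) n = pvVal n l := by
  induction l with
  | nil => intro n; simp [pvChars, pvVal]
  | cons a t ih =>
      intro n
      have ha := hb a (by simp)
      simp only [pvChars, List.flatMap_cons, List.foldl_append]
      rw [pvToChars_digit a ha.1 ha.2 n]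
      have := ih (fun d hd => hb d (by simp [hd])) (n * 10 + a)
      simp only [pvChars] at this
      rw [this]
      simp [pvVal]

theorem pvInt?_chars (l : List Int) (hb : ∀ d ∈ l, 0 ≤ d ∧ d < 10) (h : l ≠ []) :
    pvInt? (pvChars l) = some (pvVal 0 l) := by
  rw [pvInt?, if_neg (pvChars_ne_nil l hb h), pvFoldChars l hb 0]
theorem pvFoldEmit (l : List Int) : ∀ n1 n2 : Int,
    (l.foldl (fun st d => pvEmit d st) (n1, n2, true)
       = (pvVal n1 (pvSplit2 l).1, pvVal n2 (pvSplit2 l).2, decide (l.length % 2 = 0)))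
    ∧ (l.foldl (fun st d => pvEmit d st) (n1, n2, false)
       = (pvVal n1 (pvSplit2 l).2, pvVal n2 (pvSplit2 l).1, !decide (l.length % 2 = 0))) := by
  induction l with
  | nil => intro n1 n2; simp [pvSplit2, pvVal]
  | cons a t ih =>
      intro n1 n2
      have hparity : decide ((a :: t).length % 2 = 0) = !decide (t.length % 2 = 0) := by
        simp only [List.length_cons]
        rcases Nat.even_or_odd t.length with he | ho
        · have h0 : t.length % 2 = 0 := Nat.even_iff.mp he
          have h1 : (t.length + 1) % 2 = 1 := by omega
          simp [h0, h1]
        · have h0 : t.length % 2 = 1 := Nat.odd_iff.mp ho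
          have h1 : (t.length + 1) % 2 = 0 := by omega
          simp [h0, h1]
      constructor
      · rw [List.foldl_cons, show pvEmit a (n1, n2, true) = (n1 * 10 + a, n2, false) from by
          simp [pvEmit], (ih (n1 * 10 + a) n2).2, hparity]
        simp only [pvSplit2, pvVal, List.foldl_cons]
      · rw [List.foldl_cons, show pvEmit a (n1, n2, false) = (n1, n2 * 10 + a, true) from by
          simp [pvEmit], (ih n1 (n2 * 10 + a)).1, hparity]
        simp only [pvSplit2, pvVal, List.foldl_cons, Bool.not_not]
theorem pvTable (l : List Int) : ∀ (counts : List Int), counts.length = 10 →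
    (∀ d ∈ l, 0 ≤ d ∧ d < 10) → ∀ j : Int, 0 ≤ j → j < 10 →
    PySem.List.pyGetD
        (l.foldl (fun c d => PySem.List.pySetD c d (PySem.List.pyGetD c d 0 + 1)) counts) j 0
      = PySem.List.pyGetD counts j 0 + (l.count j : Int) := by
  induction l with
  | nil => intro counts _ _ j _ _; simp
  | cons a t ih =>
      intro counts hlen hb j hj0 hj1
      have ha := hb a (by simp)
      have hset : PySem.List.pySetD counts a (PySem.List.pyGetD counts a 0 + 1)
          = counts.set a.toNat (PySem.List.pyGetD counts a 0 + 1) :=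
        PySem.List.pySetD_of_nonneg _ _ ha.1
      have hlen2 : (PySem.List.pySetD counts a (PySem.List.pyGetD counts a 0 + 1)).length = 10 := by
        rw [hset]; simp [hlen]
      rw [List.foldl_cons, ih _ hlen2 (fun d hd => hb d (by simp [hd])) j hj0 hj1]
      have hja : PySem.List.pyGetD (PySem.List.pySetD counts a (PySem.List.pyGetD counts a 0 + 1)) j 0
          = if j = a then PySem.List.pyGetD counts a 0 + 1 else PySem.List.pyGetD counts j 0 := by
        rw [hset]
        rw [PySem.List.pyGetD_eq_getElem _ _ hj0 (by simp [hlen]; omega)]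
        rw [List.getElem_set]
        by_cases hcase : j = a
        · subst hcase
          simp only [if_pos rfl]
          rw [PySem.List.pyGetD_eq_getElem _ _ hj0 (by simp [hlen]; omega)]
        · have : a.toNat ≠ j.toNat := by omega
          rw [if_neg this]
          rw [PySem.List.pyGetD_eq_getElem _ _ hj0 (by simp [hlen]; omega)]
          simp [hcase]
      rw [hja, List.count_cons]
      by_cases hcase : j = a
      · subst hcase; simp; omega
      · have hne : ¬ (a == j) := by simp; omega
        simp [hcase, hne]

theorem pvCounts_spec (num : Int) (d : Int) (h0 : 0 ≤ d) (h1 : d < 10) :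
    PySem.List.pyGetD (pvCount num (List.replicate 10 0)) d 0 = ((pvDigs num).count d : Int) := by
  rw [pvCount_eq]
  rw [pvTable (pvDigs num) (List.replicate 10 0) (by simp) (pvDigs_bounds num) d h0 h1]
  rw [PySem.List.pyGetD_eq_getElem _ _ h0 (by simp; omega), List.getElem_replicate]
  omega

theorem pvRangeRep (d : Int) (k : Nat) : ∀ st : Int × Int × Bool,
    (List.range k).foldl (fun st _ => pvEmit d st) st
      = (List.replicate k d).foldl (fun st x => pvEmit x st) st := by
  induction k with
  | zero => intro st; simp
  | succ n ih =>
      intro st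
      rw [List.range_succ, List.replicate_succ', List.foldl_append, List.foldl_append, ih]
      simp

theorem pvFoldOuter (cnt : Int → Nat) (ds : List Int) : ∀ st : Int × Int × Bool,
    ds.foldl (fun st d => (List.range (cnt d)).foldl (fun st _ => pvEmit d st) st) st
      = (ds.flatMap (fun d => List.replicate (cnt d) d)).foldl (fun st d => pvEmit d st) st := by
  induction ds with
  | nil => intro st; simp
  | cons a t ih =>
      intro st
      rw [List.foldl_cons, List.flatMap_cons, List.foldl_append, ih, pvRangeRep]
theorem pvCountFlat (l : List Int) (a : Int) : ∀ (ds : List Int), ds.Nodup →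
    (ds.flatMap (fun d => List.replicate (l.count d) d)).count a
      = if a ∈ ds then l.count a else 0 := by
  intro ds
  induction ds with
  | nil => simp
  | cons d t ih =>
      intro hnd
      rw [List.flatMap_cons, List.count_append, List.count_replicate,
        ih (List.nodup_cons.mp hnd).2]
      by_cases had : a = d
      · subst had
        have : a ∉ t := (List.nodup_cons.mp hnd).1
        simp [this]
      · simp [had, List.mem_cons]
        exact fun h => absurd h.symm had
theorem pvAsc_eq_sorted (l : List Int) (hb : ∀ d ∈ l, 0 ≤ d ∧ d < 10) :
    PySem.List.sorted l (fun x => x) false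
      = (PySem.List.pyRange 0 10 1).flatMap (fun d => List.replicate (l.count d) d) := by
  apply PySem.List.sorted_id_eq_of_perm_of_pairwise
  · rw [List.perm_iff_count]
    intro a
    rw [pvCountFlat l a _ (PySem.List.nodup_pyRange_one 0 10)]
    by_cases ha : a ∈ PySem.List.pyRange 0 10 1
    · simp [ha]
    · rw [if_neg ha]
      have : a ∉ l := by
        intro hal
        exact ha ((PySem.List.mem_pyRange_one).mpr ⟨(hb a hal).1, (hb a hal).2⟩)
      simp [List.count_eq_zero_of_not_mem this]
  · rw [List.flatMap]
    apply List.pairwise_flatten.mpr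
    refine ⟨?_, ?_⟩
    · intro l' hl'
      rcases List.mem_map.mp hl' with ⟨d, _, rfl⟩
      exact List.pairwise_replicate.mpr (Or.inr le_rfl)
    · apply List.Pairwise.map (R := fun d e : Int => d ≤ e)
      · intro d e hde x hx y hy
        rw [List.eq_of_mem_replicate hx, List.eq_of_mem_replicate hy]
        exact hde
      · exact (PySem.List.pairwise_lt_pyRange_one 0 10).imp le_of_lt
theorem splitNum_spec' (num : Int) (hpre : 10 ≤ num) : splitNum num = splitNum_alt num := by
  have hb : ∀ d ∈ pvDigs num, 0 ≤ d ∧ d < 10 := pvDigs_bounds num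
  set s := PySem.List.sorted (pvDigs num) (fun x => x) false with hs
  have hsb : ∀ d ∈ s, 0 ≤ d ∧ d < 10 := fun d hd =>
    hb d ((PySem.List.mem_sorted _ _ _ _).mp hd)
  have hslen : 2 ≤ s.length := by
    rw [hs, PySem.List.length_sorted]; exact pvDigs_len2 num hpre
  have h1ne : (pvSplit2 s).1 ≠ [] := by
    have := (pvSplit2_len s).1
    intro hcon; rw [hcon] at this; simp at this; omega
  have h2ne : (pvSplit2 s).2 ≠ [] := by
    have := (pvSplit2_len s).2
    intro hcon; rw [hcon] at this; simp at this; omega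
  have h1b : ∀ d ∈ (pvSplit2 s).1, 0 ≤ d ∧ d < 10 :=
    fun d hd => hsb d ((pvSplit2_mem s).1 d hd)
  have h2b : ∀ d ∈ (pvSplit2 s).2, 0 ≤ d ∧ d < 10 :=
    fun d hd => hsb d ((pvSplit2_mem s).2 d hd)
  -- A's value
  have hA : splitNum num = pvVal 0 (pvSplit2 s).1 + pvVal 0 (pvSplit2 s).2 := by
    rw [splitNum]
    rw [pvExtract_eq num [], List.nil_append, ← hs, pvPairs_eq s]
    rw [pvInt?_chars _ h1b h1ne, pvInt?_chars _ h2b h2ne]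
    rfl
  -- B's value
  have hasc : s = (PySem.List.pyRange 0 10 1).flatMap
      (fun d => List.replicate ((pvDigs num).count d) d) := by
    rw [hs]; exact pvAsc_eq_sorted (pvDigs num) hb
  have hB : splitNum_alt num = pvVal 0 (pvSplit2 s).1 + pvVal 0 (pvSplit2 s).2 := by
    rw [splitNum_alt]
    have hcongr : (PySem.List.pyRange 0 10 1).foldl
        (fun st d => (List.range (PySem.List.pyGetD (pvCount num (List.replicate 10 0)) d 0).toNat).foldl
          (fun st _ => pvEmit d st) st) (0, 0, true)
      = (PySem.List.pyRange 0 10 1).foldl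
        (fun st d => (List.range ((pvDigs num).count d)).foldl
          (fun st _ => pvEmit d st) st) (0, 0, true) := by
      apply PySem.List.foldl_congr_mem
      intro st d hd
      rcases (PySem.List.mem_pyRange_one).mp hd with ⟨hd0, hd1⟩
      rw [pvCounts_spec num d hd0 hd1]
      simp
    rw [hcongr, pvFoldOuter (fun d => (pvDigs num).count d) _ (0, 0, true), ← hasc,
      (pvFoldEmit s 0 0).1]
  rw [hA, hB]

-- ===== VERDICT (by name: the statement is the Claim_ definition above) =====
theorem splitNum_spec : Claim_equal_splitNum := by
  unfold Claim_equal_splitNum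
  intro num _ hpre
  unfold Pre_splitNum at hpre
  unfold Spec_splitNum
  exact splitNum_spec' num hpre
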